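-- pv_equiv track=rewrite | github.com/kebutsjimuzan-coder/My_codes | longest_line_finder.py | find_longest_line
-- ===== SOURCE A (Python) =====
-- def find_longest_line(lines):
--     longest_line = None
--     list_longest_line = []
--
--     for line in lines:
--         x_line = line.strip().split()
--
--         # المقارنة بين طول السطر الحالي وأطول سطر مخزن
--         if longest_line == None or len(x_line) > len(longest_line):
--             longest_line = x_line
--             list_longest_line = []
--             list_longest_line.append(line)
--
--         elif longest_line != None and len(x_line) == len(longest_line):
--             list_longest_line.append(line)
--
--     return list_longest_line
-- ===== SOURCE B (Python) =====
-- def find_longest_line(lines):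
--     counts = [len(line.split()) for line in lines]
--     if not counts:
--         return []
--     m = max(counts)
--     return [line for line, c in zip(lines, counts) if c == m]
-- ===== Notes on version B (the rewrite author's own statement) =====
-- stated objective: simpler
-- what changed: Replaces the running-max-with-reset single pass over an Optional word-list state by a compute-all-counts, take max, filter decomposition (and drops the redundant strip before split).
import Mathlib
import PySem

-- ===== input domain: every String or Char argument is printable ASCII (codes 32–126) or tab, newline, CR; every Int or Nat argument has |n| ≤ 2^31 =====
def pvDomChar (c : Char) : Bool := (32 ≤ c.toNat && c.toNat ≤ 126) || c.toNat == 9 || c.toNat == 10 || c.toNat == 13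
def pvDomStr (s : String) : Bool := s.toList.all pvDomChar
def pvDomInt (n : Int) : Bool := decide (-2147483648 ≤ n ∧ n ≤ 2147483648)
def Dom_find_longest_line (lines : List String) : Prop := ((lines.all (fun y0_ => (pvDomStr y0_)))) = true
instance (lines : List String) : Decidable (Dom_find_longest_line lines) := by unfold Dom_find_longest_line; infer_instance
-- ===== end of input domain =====

-- B replaces A's running-max-with-reset single pass by a compute-all-counts / max / filter decomposition (simpler; same cost).

-- ===== PORT A =====
-- running state: (longest_line : Option word-list, list_longest_line)
def find_longest_line (lines : List String) : List String :=
  (lines.foldl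
    (fun (st : Option (List String) × List String) line =>
      let x_line := PySem.Str.split₀ (PySem.Str.strip line)
      match st.1 with
      | none => (some x_line, [line])
      | some w =>
        if x_line.length > w.length then (some x_line, [line])
        else if x_line.length = w.length then (st.1, st.2 ++ [line])
        else st)
    (none, [])).2

-- ===== PORT B =====
def find_longest_line_alt (lines : List String) : List String :=
  let counts := lines.map (fun line => (PySem.Str.split₀ line).length)
  match counts with
  | [] => []
  | c0 :: rest =>
    let m := rest.foldl max c0
    ((lines.zip counts).filter (fun p => p.2 == m)).map Prod.fst

-- ===== PRECONDITION & SPEC =====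
def Spec_find_longest_line (lines : List String) (out : List String) : Prop := out = find_longest_line_alt lines
instance (lines : List String) (out : List String) : Decidable (Spec_find_longest_line lines out) := by unfold Spec_find_longest_line; infer_instance

-- ===== CLAIM (what is proved, stated in full; the proofs are below) =====
def Claim_equal_find_longest_line : Prop := ∀ (lines : List String), Dom_find_longest_line lines → Spec_find_longest_line lines (find_longest_line lines)

-- ===== LEMMAS AND PROOFS =====

-- split() ignores leading/trailing whitespace, so the strip before split in A is a no-op.
theorem go_all_space (t : List Char) (cur : List Char) (acc : List (List Char))
    (h : ∀ c ∈ t, PySem.Chars.isspace c = true) :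
    PySem.Chars.split₀.go t cur acc = PySem.Chars.split₀.go [] cur acc := by
  induction t generalizing cur acc with
  | nil => rfl
  | cons c rest ih =>
    have hc : PySem.Chars.isspace c = true := h c (by simp)
    have hrest : ∀ c ∈ rest, PySem.Chars.isspace c = true := fun c hm => h c (by simp [hm])
    simp only [PySem.Chars.split₀.go, hc, if_true]
    by_cases hcur : cur.isEmpty
    · simp [hcur, ih _ _ hrest, PySem.Chars.split₀.go]
    · simp [hcur, ih _ _ hrest, PySem.Chars.split₀.go]

theorem go_append_space (s t : List Char) (cur : List Char) (acc : List (List Char))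
    (h : ∀ c ∈ t, PySem.Chars.isspace c = true) :
    PySem.Chars.split₀.go (s ++ t) cur acc = PySem.Chars.split₀.go s cur acc := by
  induction s generalizing cur acc with
  | nil => simpa using go_all_space t cur acc h
  | cons c rest ih =>
    simp only [List.cons_append, PySem.Chars.split₀.go]
    by_cases hc : PySem.Chars.isspace c
    · by_cases hcur : cur.isEmpty <;> simp [hc, hcur, ih]
    · simp [hc, ih]

theorem go_dropWhile_space (s : List Char) (acc : List (List Char)) :
    PySem.Chars.split₀.go (List.dropWhile PySem.Chars.isspace s) [] acc
      = PySem.Chars.split₀.go s [] acc := by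
  induction s with
  | nil => rfl
  | cons c rest ih =>
    by_cases hc : PySem.Chars.isspace c
    · simp only [List.dropWhile_cons, hc, if_true, ih]
      simp [PySem.Chars.split₀.go, hc]
    · simp [hc]

theorem chars_split_strip (s : List Char) :
    PySem.Chars.split₀ (PySem.Chars.strip s) = PySem.Chars.split₀ s := by
  show PySem.Chars.split₀.go (PySem.Chars.rstrip (PySem.Chars.lstrip s)) [] []
      = PySem.Chars.split₀.go s [] []
  have hdecomp : PySem.Chars.lstrip s
      = PySem.Chars.rstrip (PySem.Chars.lstrip s)
        ++ (List.takeWhile PySem.Chars.isspace (PySem.Chars.lstrip s).reverse).reverse := by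
    simp only [PySem.Chars.rstrip]
    rw [← List.reverse_append, List.takeWhile_append_dropWhile, List.reverse_reverse]
  have hspace : ∀ c ∈ (List.takeWhile PySem.Chars.isspace (PySem.Chars.lstrip s).reverse).reverse,
      PySem.Chars.isspace c = true := by
    intro c hm
    exact List.mem_takeWhile_imp (List.mem_reverse.mp hm)
  have key : PySem.Chars.split₀.go (PySem.Chars.lstrip s) [] []
      = PySem.Chars.split₀.go (PySem.Chars.rstrip (PySem.Chars.lstrip s)) [] [] := by
    conv_lhs => rw [hdecomp]
    exact go_append_space _ _ _ _ hspace
  rw [← key]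
  exact go_dropWhile_space s []

theorem str_split_strip (l : String) :
    PySem.Str.split₀ (PySem.Str.strip l) = PySem.Str.split₀ l := by
  simp only [PySem.Str.split₀]
  rw [PySem.Str.toList_strip, chars_split_strip]

-- word count of a line, as B computes it
def pvCount (l : String) : Nat := (PySem.Str.split₀ l).length

theorem countA_eq (l : String) :
    (PySem.Str.split₀ (PySem.Str.strip l)).length = pvCount l := by
  rw [str_split_strip]; rfl

-- maximum word count over a list of lines (0 for [])
def pvMax (ls : List String) : Nat := (ls.map pvCount).foldl max 0

theorem pvMax_concat (ls : List String) (x : String) :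
    pvMax (ls ++ [x]) = max (pvMax ls) (pvCount x) := by
  simp [pvMax]

theorem le_pvMax (ls : List String) : ∀ l ∈ ls, pvCount l ≤ pvMax ls := by
  intro l hl
  have := (PySem.List.le_foldl_max ((ls.map pvCount)) 0).2 (pvCount l) (by
    exact List.mem_map.mpr ⟨l, hl, rfl⟩)
  simpa [pvMax] using this

-- the fold step of A's port
def pvStep (st : Option (List String) × List String) (line : String) :
    Option (List String) × List String :=
  let x_line := PySem.Str.split₀ (PySem.Str.strip line)
  match st.1 with
  | none => (some x_line, [line])
  | some w =>
    if x_line.length > w.length then (some x_line, [line])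
    else if x_line.length = w.length then (st.1, st.2 ++ [line])
    else st

theorem pvStep_eq (lines : List String) :
    find_longest_line lines = (lines.foldl pvStep (none, [])).2 := rfl

theorem filter_high (ls : List String) (m : Nat) (hm : pvMax ls < m) :
    ls.filter (fun l => pvCount l == m) = [] := by
  apply List.filter_eq_nil_iff.mpr
  intro l hl
  have := le_pvMax ls l hl
  simp only [beq_iff_eq]
  omega

-- A's loop invariant, proved back-to-front over the input
theorem foldA_inv (ls : List String) (h : ls ≠ []) :
    ∃ w, (ls.foldl pvStep (none, [])).1 = some w ∧ w.length = pvMax ls ∧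
      (ls.foldl pvStep (none, [])).2 = ls.filter (fun l => pvCount l == pvMax ls) := by
  induction ls using List.reverseRecOn with
  | nil => exact absurd rfl h
  | append_singleton ls x ih =>
    rw [List.foldl_concat]
    rcases eq_or_ne ls [] with rfl | hne
    · refine ⟨PySem.Str.split₀ (PySem.Str.strip x), ?_⟩
      simp [pvStep, pvMax, countA_eq, List.filter]
    · obtain ⟨w, hw1, hw2, hw3⟩ := ih hne
      rcases lt_trichotomy (pvMax ls) (pvCount x) with hlt | heq | hgt
      · refine ⟨PySem.Str.split₀ (PySem.Str.strip x), ?_, ?_, ?_⟩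
        · simp [pvStep, hw1, countA_eq, hw2, hlt]
        · rw [countA_eq, pvMax_concat]; omega
        · have hmax : pvMax (ls ++ [x]) = pvCount x := by rw [pvMax_concat]; omega
          simp only [pvStep, hw1, countA_eq, hw2, if_pos hlt]
          rw [hmax, List.filter_append, filter_high ls (pvCount x) hlt]
          simp
      · have hmax : pvMax (ls ++ [x]) = pvMax ls := by rw [pvMax_concat]; omega
        refine ⟨w, ?_, ?_, ?_⟩
        · simp [pvStep, hw1, countA_eq, hw2, heq]
        · omega
        · simp only [pvStep, hw1, countA_eq, hw2]
          rw [if_neg (by omega), if_pos heq.symm]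
          simp only [hmax, List.filter_append, hw3]
          simp [heq]
      · have hmax : pvMax (ls ++ [x]) = pvMax ls := by rw [pvMax_concat]; omega
        refine ⟨w, ?_, ?_, ?_⟩
        · simp only [pvStep, hw1, countA_eq, hw2]
          rw [if_neg (by omega), if_neg (by omega)]
          exact hw1
        · omega
        · simp only [pvStep, hw1, countA_eq, hw2]
          rw [if_neg (by omega), if_neg (by omega)]
          simp only [hmax, List.filter_append, hw3]
          have : pvCount x ≠ pvMax ls := by omega
          simp [this]

-- B's result is the same max-filter
theorem altB_eq (ls : List String) (h : ls ≠ []) :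
    find_longest_line_alt ls = ls.filter (fun l => pvCount l == pvMax ls) := by
  obtain ⟨l0, t, rfl⟩ := List.exists_cons_of_ne_nil h
  show ((((l0 :: t).zip ((l0 :: t).map (fun line => (PySem.Str.split₀ line).length))).filter
      (fun p => p.2 == (t.map (fun line => (PySem.Str.split₀ line).length)).foldl max
        ((PySem.Str.split₀ l0).length))).map Prod.fst)
    = (l0 :: t).filter (fun l => pvCount l == pvMax (l0 :: t))
  have hm : (t.map (fun line => (PySem.Str.split₀ line).length)).foldl max
      ((PySem.Str.split₀ l0).length) = pvMax (l0 :: t) := by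
    simp only [pvMax, List.map_cons, List.foldl_cons, Nat.zero_max]
    rfl
  rw [hm]
  have hzip : (l0 :: t).zip ((l0 :: t).map (fun line => (PySem.Str.split₀ line).length))
      = (l0 :: t).map (fun a => (a, pvCount a)) :=
    List.map_prod_left_eq_zip.symm
  rw [hzip, List.filter_map, List.map_map]
  simp [Function.comp_def, pvCount]

-- ===== VERDICT (by name: the statement is the Claim_ definition above) =====
theorem find_longest_line_spec : Claim_equal_find_longest_line := by
  intro lines _
  show find_longest_line lines = find_longest_line_alt lines
  rcases eq_or_ne lines [] with rfl | h
  · rfl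
  · rw [pvStep_eq, (foldA_inv lines h).choose_spec.2.2, altB_eq lines h]
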